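-- pv_equiv track=rewrite | github.com/YashB63/GFG-Daily-Questions | Day 182/Construct list using given q XOR queries/construct_list.py | constructList
-- ===== SOURCE A (Python) =====
-- from typing import List
--
-- def constructList(q : int, queries : List[List[int]]) -> List[int]:
--
--     val=0
--     ans=[]
--     for i in range(q-1,-1,-1):
--         if queries[i][0]:
--             val^=queries[i][1]
--         else:
--             queries[i][1]^=val
--             ans.append(queries[i][1])
--     ans.append(val)
--     ans.sort()
--     return ans
-- ===== SOURCE B (Python) =====
-- from typing import List
--
-- def constructList(q : int, queries : List[List[int]]) -> List[int]:
--     rows = queries[:max(q, 0)]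
--     # prefix-XOR table: pre[k] = XOR of the type-1 values among the first k rows
--     pre = [0]
--     for r in rows:
--         pre.append(pre[-1] ^ (r[1] if r[0] else 0))
--     V = pre[-1]
--     ans = []
--     for r, p in zip(rows, pre[1:]):
--         if not r[0]:
--             r[1] ^= V ^ p
--             ans.append(r[1])
--     ans.append(V)
--     ans.sort()
--     return ans
-- ===== Notes on version B (the rewrite author's own statement) =====
-- stated objective: alternative
-- what changed: A scans the queries once backwards carrying a running XOR of type-1 values in loop state; B slices off the first q rows, materialises an explicit prefix-XOR table as a list, then zips the rows with that table to emit each type-0 value XORed with the suffix XOR V^pre[i+1] (performing the same in-place mutation of queries[i][1]).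
import Mathlib
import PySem

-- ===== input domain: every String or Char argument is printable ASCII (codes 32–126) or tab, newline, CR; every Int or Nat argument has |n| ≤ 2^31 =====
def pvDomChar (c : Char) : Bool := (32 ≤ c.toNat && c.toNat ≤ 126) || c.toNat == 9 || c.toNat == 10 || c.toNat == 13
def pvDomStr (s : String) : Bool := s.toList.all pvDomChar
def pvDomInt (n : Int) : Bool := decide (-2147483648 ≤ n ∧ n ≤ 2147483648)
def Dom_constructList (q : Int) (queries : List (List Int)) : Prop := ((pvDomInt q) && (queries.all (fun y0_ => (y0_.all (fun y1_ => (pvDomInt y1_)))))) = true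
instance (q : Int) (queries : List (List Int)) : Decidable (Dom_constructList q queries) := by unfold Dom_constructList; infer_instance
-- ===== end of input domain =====

-- B replaces A's single backward scan with loop-carried XOR state by a slice of the first q rows, a
-- materialised prefix-XOR table and a zip-based second pass; the equivalence proved here is about the
-- return value (both Pythons perform the identical in-place mutation of queries[i][1]).

-- ===== PORT A =====
def constructList (q : Int) (queries : List (List Int)) : List Int :=
  let res := (PySem.List.pyRange (q - 1) (-1) (-1)).foldl
    (fun (s : Int × List Int) i =>
      let row := PySem.List.pyGetD queries i []
      if PySem.List.pyGetD row 0 0 ≠ 0 then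
        (PySem.Int.bxor s.1 (PySem.List.pyGetD row 1 0), s.2)
      else
        (s.1, s.2 ++ [PySem.Int.bxor (PySem.List.pyGetD row 1 0) s.1])) (0, [])
  PySem.List.sorted (res.2 ++ [res.1]) (fun x => x) false

-- ===== PORT B =====
def constructList_alt (q : Int) (queries : List (List Int)) : List Int :=
  let rows := PySem.List.slice queries none (some (max q 0))
  let pre := rows.foldl
    (fun (p : List Int) r =>
      p ++ [PySem.Int.bxor (PySem.List.pyGetD p (-1) 0)
              (if PySem.List.pyGetD r 0 0 ≠ 0 then PySem.List.pyGetD r 1 0 else 0)]) [0]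
  let V := PySem.List.pyGetD pre (-1) 0
  let ans := (rows.zip (PySem.List.slice pre (some 1) none)).foldl
    (fun (a : List Int) rp =>
      if PySem.List.pyGetD rp.1 0 0 ≠ 0 then a
      else a ++ [PySem.Int.bxor (PySem.List.pyGetD rp.1 1 0) (PySem.Int.bxor V rp.2)]) []
  PySem.List.sorted (ans ++ [V]) (fun x => x) false

-- ===== PRECONDITION & SPEC =====
-- Pre_ excludes exactly the inputs where Python A raises an IndexError: an index 0 ≤ i < q
-- beyond the end of queries, or a row among the first q with fewer than 2 elements.
def Pre_constructList (q : Int) (queries : List (List Int)) : Prop :=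
  q ≤ (queries.length : Int) ∧ ∀ r ∈ queries.take q.toNat, 2 ≤ r.length
instance (q : Int) (queries : List (List Int)) : Decidable (Pre_constructList q queries) := by
  unfold Pre_constructList; infer_instance
def pvWitness_constructList : Int × List (List Int) := (2, [[1, 5], [0, 3]])

def Spec_constructList (q : Int) (queries : List (List Int)) (out : List Int) : Prop := out = constructList_alt q queries
instance (q : Int) (queries : List (List Int)) (out : List Int) : Decidable (Spec_constructList q queries out) := by unfold Spec_constructList; infer_instance

-- ===== CLAIM (what is proved, stated in full; the proofs are below) =====
def Claim_equal_constructList : Prop := ∀ (q : Int) (queries : List (List Int)), Dom_constructList q queries → Pre_constructList q queries → Spec_constructList q queries (constructList q queries)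

-- ===== LEMMAS AND PROOFS =====

-- xor algebra on PySem.Int.bxor
lemma pv_bxor_ofNat_ofNat (m n : Nat) :
    PySem.Int.bxor (Int.ofNat m) (Int.ofNat n) = Int.ofNat (m ^^^ n) := by
  simp

lemma pv_bxor_ofNat_negSucc (m n : Nat) :
    PySem.Int.bxor (Int.ofNat m) (Int.negSucc n) = Int.negSucc (m ^^^ n) := by
  simp [PySem.Int.bxor, Int.negSucc_eq]
  split_ifs <;> omega

lemma pv_bxor_negSucc_ofNat (m n : Nat) :
    PySem.Int.bxor (Int.negSucc m) (Int.ofNat n) = Int.negSucc (m ^^^ n) := by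
  rw [PySem.Int.bxor_comm, pv_bxor_ofNat_negSucc, Nat.xor_comm]

lemma pv_bxor_negSucc_negSucc (m n : Nat) :
    PySem.Int.bxor (Int.negSucc m) (Int.negSucc n) = Int.ofNat (m ^^^ n) := by
  have : PySem.Int.bxor (Int.negSucc m) (Int.negSucc n) = ((m ^^^ n : Nat) : Int) := by
    simp [PySem.Int.bxor, Int.negSucc_eq]
    split_ifs <;> omega
  rw [this]; rfl

lemma pv_bxor_assoc (a b c : Int) :
    PySem.Int.bxor (PySem.Int.bxor a b) c = PySem.Int.bxor a (PySem.Int.bxor b c) := by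
  rcases a with m | m <;> rcases b with n | n <;> rcases c with k | k <;>
    simp only [pv_bxor_ofNat_ofNat, pv_bxor_ofNat_negSucc, pv_bxor_negSucc_ofNat,
      pv_bxor_negSucc_negSucc, Nat.xor_assoc]

lemma pv_zero_bxor (a : Int) : PySem.Int.bxor 0 a = a := by
  rw [PySem.Int.bxor_comm]; exact PySem.Int.bxor_zero a

-- row accessors and the abstract loop bodies
def pvB0 (r : List Int) : Int := PySem.List.pyGetD r 0 0
def pvB1 (r : List Int) : Int := PySem.List.pyGetD r 1 0

def pvStepX (v : Int) (r : List Int) : Int :=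
  if pvB0 r ≠ 0 then PySem.Int.bxor v (pvB1 r) else v

def pvX (v : Int) (L : List (List Int)) : Int := L.foldl pvStepX v

def pvStepA (s : Int × List Int) (r : List Int) : Int × List Int :=
  if pvB0 r ≠ 0 then (PySem.Int.bxor s.1 (pvB1 r), s.2)
  else (s.1, s.2 ++ [PySem.Int.bxor (pvB1 r) s.1])

-- B's abstract pieces: prefix-XOR step, table builder, zip-pass emitter
def pvStep (p : Int) (r : List Int) : Int :=
  PySem.Int.bxor p (if pvB0 r ≠ 0 then pvB1 r else 0)

def pvBuild (p : List Int) (r : List Int) : List Int :=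
  p ++ [PySem.Int.bxor (PySem.List.pyGetD p (-1) 0) (if pvB0 r ≠ 0 then pvB1 r else 0)]

def pvEmit (V : Int) (a : List Int) (rp : List Int × Int) : List Int :=
  if pvB0 rp.1 ≠ 0 then a
  else a ++ [PySem.Int.bxor (pvB1 rp.1) (PySem.Int.bxor V rp.2)]

def pvGA (v : Int) : List (List Int) → List Int
  | [] => []
  | r :: t => if pvB0 r ≠ 0 then pvGA (PySem.Int.bxor v (pvB1 r)) t
              else PySem.Int.bxor (pvB1 r) v :: pvGA v t

def pvGB (V P : Int) : List (List Int) → List Int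
  | [] => []
  | r :: t => if pvB0 r ≠ 0 then pvGB V (PySem.Int.bxor P (pvB1 r)) t
              else PySem.Int.bxor (pvB1 r) (PySem.Int.bxor V P) :: pvGB V P t

def pvC (v : Int) : List (List Int) → List Int
  | [] => []
  | r :: t => if pvB0 r ≠ 0 then pvC v t
              else PySem.Int.bxor (pvB1 r) (PySem.Int.bxor v (pvX 0 t)) :: pvC v t

lemma pvStep_eq_pvStepX (v : Int) (r : List Int) : pvStep v r = pvStepX v r := by
  unfold pvStep pvStepX
  by_cases h : pvB0 r ≠ 0 <;> simp [h, PySem.Int.bxor_zero]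

lemma pvX_shift (L : List (List Int)) : ∀ v, pvX v L = PySem.Int.bxor v (pvX 0 L) := by
  induction L with
  | nil => intro v; simp [pvX, PySem.Int.bxor_zero]
  | cons r t ih =>
    intro v
    simp only [pvX, List.foldl_cons] at *
    rw [ih (pvStepX v r), ih (pvStepX 0 r)]
    by_cases h : pvB0 r ≠ 0 <;> simp [pvStepX, h, pv_zero_bxor, pv_bxor_assoc]

lemma pvX_reverse (L : List (List Int)) : pvX 0 L.reverse = pvX 0 L := by
  induction L with
  | nil => rfl
  | cons r t ih =>
    rw [List.reverse_cons, pvX, List.foldl_append]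
    show pvX (pvX 0 t.reverse) [r] = pvX 0 (r :: t)
    rw [ih]
    show pvStepX (pvX 0 t) r = pvX 0 (r :: t)
    rw [show pvX 0 (r :: t) = pvX (pvStepX 0 r) t from rfl, pvX_shift t (pvStepX 0 r)]
    by_cases h : pvB0 r ≠ 0 <;> simp [pvStepX, h, pv_zero_bxor, PySem.Int.bxor_comm]

lemma foldA_char (M : List (List Int)) : ∀ v acc,
    M.foldl pvStepA (v, acc) = (pvX v M, acc ++ pvGA v M) := by
  induction M with
  | nil => intro v acc; simp [pvX, pvGA]
  | cons r t ih =>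
    intro v acc
    by_cases h : pvB0 r ≠ 0 <;>
      simp [List.foldl_cons, pvStepA, pvGA, h, ih, pvX, pvStepX]

lemma pvGA_append (M N : List (List Int)) : ∀ v,
    pvGA v (M ++ N) = pvGA v M ++ pvGA (pvX v M) N := by
  induction M with
  | nil => intro v; simp [pvGA, pvX]
  | cons r t ih =>
    intro v
    by_cases h : pvB0 r ≠ 0 <;>
      simp [pvGA, h, ih, pvX, pvStepX, List.foldl_cons]

lemma pvGA_reverse (L : List (List Int)) : ∀ v, pvGA v L.reverse = (pvC v L).reverse := by
  induction L with
  | nil => intro v; rfl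
  | cons r t ih =>
    intro v
    rw [List.reverse_cons, pvGA_append, ih, pvX_shift t.reverse, pvX_reverse]
    by_cases h : pvB0 r ≠ 0 <;> simp [pvGA, pvC, h]

lemma pvGB_eq_pvC (L : List (List Int)) : ∀ V P,
    pvGB V P L = pvC (PySem.Int.bxor V (PySem.Int.bxor P (pvX 0 L))) L := by
  induction L with
  | nil => intro V P; rfl
  | cons r t ih =>
    intro V P
    by_cases h : pvB0 r ≠ 0
    · simp only [pvGB, pvC, if_pos h, ih]
      congr 1
      have hx : pvX 0 (r :: t) = PySem.Int.bxor (PySem.Int.bxor 0 (pvB1 r)) (pvX 0 t) := by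
        rw [pvX, List.foldl_cons]
        simp only [pvStepX, if_pos h]
        exact pvX_shift t _
      rw [hx]
      simp [pv_zero_bxor, pv_bxor_assoc]
    · have hxt : pvX 0 (r :: t) = pvX 0 t := by
        simp [pvX, List.foldl_cons, pvStepX, h]
      simp only [pvGB, pvC, if_neg h, ih, hxt]
      congr 2
      simp [pv_bxor_assoc, PySem.Int.bxor_self, PySem.Int.bxor_zero]

-- ----- B-side structural lemmas: the table fold is a scanl, the zip pass is pvGB -----

lemma pv_scanl_ne_nil (v : Int) (L : List (List Int)) : List.scanl pvStep v L ≠ [] := by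
  intro h
  have := congrArg List.length h
  simp [List.length_scanl] at this

lemma pv_scanl_eq_cons (v : Int) (L : List (List Int)) :
    List.scanl pvStep v L = v :: (List.scanl pvStep v L).tail := by
  cases L <;> simp [List.scanl]

lemma pv_scanl_last (L : List (List Int)) : ∀ v,
    PySem.List.pyGetD (List.scanl pvStep v L) (-1) 0 = L.foldl pvStep v := by
  induction L with
  | nil =>
    intro v
    rw [List.scanl_nil, PySem.List.pyGetD_neg_one [v] 0 (List.cons_ne_nil _ _)]
    simp
  | cons r t ih =>
    intro v
    have hne := pv_scanl_ne_nil (pvStep v r) t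
    rw [List.scanl_cons, PySem.List.pyGetD_neg_one _ 0 (List.cons_ne_nil _ _),
      List.getLast_cons hne, ← PySem.List.pyGetD_neg_one _ 0 hne, ih, List.foldl_cons]

lemma pv_preFold (L : List (List Int)) : ∀ (p : List Int) (v : Int), p ≠ [] →
    PySem.List.pyGetD p (-1) 0 = v →
    L.foldl pvBuild p = p ++ (List.scanl pvStep v L).tail := by
  induction L with
  | nil => intro p v _ _; simp [List.scanl]
  | cons r t ih =>
    intro p v hp hv
    have hb : pvBuild p r = p ++ [pvStep v r] := by
      unfold pvBuild pvStep; rw [hv]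
    rw [List.foldl_cons, hb,
      ih (p ++ [pvStep v r]) (pvStep v r) (by simp)
        (PySem.List.pyGetD_neg_one_append_singleton p (pvStep v r) 0),
      List.scanl_cons, List.tail_cons, pv_scanl_eq_cons (pvStep v r) t]
    simp

lemma pv_preFold_top (L : List (List Int)) :
    L.foldl pvBuild [0] = List.scanl pvStep 0 L := by
  rw [pv_preFold L [0] 0 (List.cons_ne_nil _ _)
    (by rw [PySem.List.pyGetD_neg_one [(0 : Int)] 0 (List.cons_ne_nil _ _)]; simp)]
  exact (pv_scanl_eq_cons 0 L).symm

lemma pv_zip_cons_scanl (t : List (List Int)) (r : List Int) (u : Int) :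
    (r :: t).zip (List.scanl pvStep u t) = (r, u) :: t.zip ((List.scanl pvStep u t).tail) := by
  cases t <;> simp [List.scanl]

lemma pv_zipFold (V : Int) (L : List (List Int)) : ∀ (w : Int) (a : List Int),
    (L.zip ((List.scanl pvStep w L).tail)).foldl (pvEmit V) a = a ++ pvGB V w L := by
  induction L with
  | nil => intro w a; simp [pvGB]
  | cons r t ih =>
    intro w a
    rw [List.scanl_cons, List.tail_cons, pv_zip_cons_scanl, List.foldl_cons, ih]
    by_cases h : pvB0 r ≠ 0
    · have hu : pvStep w r = PySem.Int.bxor w (pvB1 r) := by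
        unfold pvStep; rw [if_pos h]
      simp [pvEmit, pvGB, h, hu]
    · have hu : pvStep w r = w := by
        unfold pvStep; rw [if_neg h, PySem.Int.bxor_zero]
      simp [pvEmit, pvGB, h, hu]

lemma pv_foldl_pvStep (L : List (List Int)) : ∀ v, L.foldl pvStep v = pvX v L := by
  induction L with
  | nil => intro v; rfl
  | cons r t ih =>
    intro v
    rw [List.foldl_cons, pvStep_eq_pvStepX, ih]
    rfl

-- the first q rows, as A's index loop sees them and as B's slice sees them
lemma pv_rows_eq (queries : List (List Int)) (q : Int) (hq : q ≤ (queries.length : Int)) :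
    (PySem.List.pyRange 0 q 1).map (fun i => PySem.List.pyGetD queries i []) =
      queries.take (max q 0).toNat := by
  by_cases h0 : q ≤ 0
  · rw [PySem.List.pyRange_one_eq_nil h0]
    have : (max q 0).toNat = 0 := by omega
    simp [this]
  · have hmax : max q 0 = q := by omega
    rw [hmax]
    apply List.ext_getElem
    · rw [List.length_map, PySem.List.length_pyRange_one, List.length_take]
      omega
    · intro k hk1 hk2
      have hk : k < q.toNat := by
        rw [List.length_map, PySem.List.length_pyRange_one] at hk1
        omega
      rw [List.getElem_map, PySem.List.getElem_pyRange_one, List.getElem_take]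
      rw [PySem.List.pyGetD_eq_getElem queries [] (by omega) (by omega)]
      congr 1
      omega

lemma main_eq (L : List (List Int)) :
    PySem.List.sorted ((L.reverse.foldl pvStepA ((0 : Int), ([] : List Int))).2 ++
        [(L.reverse.foldl pvStepA ((0 : Int), ([] : List Int))).1]) (fun x => x) false =
    PySem.List.sorted (pvGB (pvX 0 L) 0 L ++ [pvX 0 L]) (fun x => x) false := by
  rw [foldA_char]
  simp only [pvX_reverse, pvGA_reverse, List.nil_append]
  rw [pvGB_eq_pvC]
  have h0 : PySem.Int.bxor (pvX 0 L) (PySem.Int.bxor 0 (pvX 0 L)) = 0 := by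
    rw [pv_zero_bxor, PySem.Int.bxor_self]
  rw [h0]
  apply PySem.List.sorted_eq_sorted_of_perm
  · exact fun a b hab => hab
  · exact (List.reverse_perm _).append (List.Perm.refl _)

-- ===== VERDICT (by name: the statement is the Claim_ definition above) =====
theorem constructList_spec : Claim_equal_constructList := by
  intro q queries _ hpre
  obtain ⟨hq, -⟩ := hpre
  unfold Spec_constructList constructList constructList_alt
  rw [show PySem.List.pyRange (q - 1) (-1) (-1) = (PySem.List.pyRange 0 q 1).reverse by
    simpa using PySem.List.pyRange_neg_one_eq_reverse (q - 1) (-1)]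
  have hA : ((PySem.List.pyRange 0 q 1).reverse).foldl
      (fun (s : Int × List Int) i =>
        let row := PySem.List.pyGetD queries i []
        if PySem.List.pyGetD row 0 0 ≠ 0 then
          (PySem.Int.bxor s.1 (PySem.List.pyGetD row 1 0), s.2)
        else
          (s.1, s.2 ++ [PySem.Int.bxor (PySem.List.pyGetD row 1 0) s.1])) ((0 : Int), ([] : List Int))
      = (((PySem.List.pyRange 0 q 1).map (fun i => PySem.List.pyGetD queries i [])).reverse).foldl
          pvStepA ((0 : Int), ([] : List Int)) := by
    rw [← List.map_reverse]
    exact (List.foldl_map (f := fun i => PySem.List.pyGetD queries i []) (g := pvStepA)).symm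
  rw [hA, pv_rows_eq queries q hq]
  have hslice : PySem.List.slice queries none (some (max q 0)) = queries.take (max q 0).toNat :=
    PySem.List.slice_to queries (le_max_right q 0)
  rw [hslice]
  set rows := queries.take (max q 0).toNat with hrows
  simp only []
  have hpre1 : rows.foldl
      (fun (p : List Int) r =>
        p ++ [PySem.Int.bxor (PySem.List.pyGetD p (-1) 0)
                (if PySem.List.pyGetD r 0 0 ≠ 0 then PySem.List.pyGetD r 1 0 else 0)]) [0]
      = List.scanl pvStep 0 rows := pv_preFold_top rows
  rw [hpre1, pv_scanl_last rows 0]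
  rw [pv_foldl_pvStep rows 0]
  have htail : PySem.List.slice (List.scanl pvStep 0 rows) (some 1) none
      = (List.scanl pvStep 0 rows).tail := PySem.List.slice_from_one _
  rw [htail]
  have hB : (rows.zip ((List.scanl pvStep 0 rows).tail)).foldl
      (fun (a : List Int) rp =>
        if PySem.List.pyGetD rp.1 0 0 ≠ 0 then a
        else a ++ [PySem.Int.bxor (PySem.List.pyGetD rp.1 1 0)
                     (PySem.Int.bxor (pvX 0 rows) rp.2)]) []
      = pvGB (pvX 0 rows) 0 rows := pv_zipFold (pvX 0 rows) rows 0 []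
  rw [hB]
  exact main_eq rows
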